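-- pv_equiv track=rewrite | github.com/xflasar/Friend-Stuff-Freelance-Help-Etc | 1-8 Lectures/2/Posloupnosti/Alternujuci_Rada.py | special_sequence
-- ===== SOURCE A (Python) =====
-- def special_sequence(n):
--     sequence = []
--     i = 1
--     while len(sequence) < 2 * n:
--         sequence.append(i)
--         sequence.append(-i)
--         i += 1
--     return sequence[:n]
-- ===== SOURCE B (Python) =====
-- def special_sequence(n):
--     return [(k // 2 + 1) if k % 2 == 0 else -(k // 2 + 1) for k in range(n)]
-- ===== Notes on version B (the rewrite author's own statement) =====
-- stated objective: simpler
-- what changed: Replaces the pair-appending while-loop plus slice (builds 2n elements, keeps n) with a single comprehension over range(n) computing each element from its index by a closed per-index rule (magnitude k//2+1, sign by parity of k).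
import Mathlib
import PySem

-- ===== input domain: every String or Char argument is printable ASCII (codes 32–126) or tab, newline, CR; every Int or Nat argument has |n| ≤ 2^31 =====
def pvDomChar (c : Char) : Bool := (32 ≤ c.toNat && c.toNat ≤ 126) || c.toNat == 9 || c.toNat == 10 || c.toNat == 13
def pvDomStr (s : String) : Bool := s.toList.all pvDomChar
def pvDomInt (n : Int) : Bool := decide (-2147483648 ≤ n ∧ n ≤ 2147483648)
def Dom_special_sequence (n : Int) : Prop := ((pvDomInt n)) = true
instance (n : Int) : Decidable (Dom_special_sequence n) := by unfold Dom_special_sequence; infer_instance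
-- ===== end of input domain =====

-- B replaces A's pair-appending while-loop plus slice by a per-index closed form over range(n); objective: simpler.

-- ===== PORT A =====
-- A's while-loop: each iteration appends i and -i and increments i; it runs while
-- len(sequence) < 2*n, i.e. exactly n.toNat times (length grows by 2 from 0), so
-- n.toNat is exact fuel; the fuel-0 fallthrough returns sequence as the loop exit does.
def specialSeqLoop (n : Int) (fuel : Nat) (seq : List Int) (i : Int) : List Int :=
  match fuel with
  | 0 => seq
  | f + 1 =>
    if (seq.length : Int) < 2 * n then
      specialSeqLoop n f (seq ++ [i, -i]) (i + 1)
    else seq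

def special_sequence (n : Int) : List Int :=
  PySem.List.slice (specialSeqLoop n n.toNat [] 1) none (some n)

-- ===== PORT B =====
def special_sequence_alt (n : Int) : List Int :=
  (PySem.List.pyRange 0 n 1).map (fun k =>
    if PySem.Int.mod k 2 = 0 then PySem.Int.floordiv k 2 + 1
    else -(PySem.Int.floordiv k 2 + 1))

-- ===== PRECONDITION & SPEC =====
def Spec_special_sequence (n : Int) (out : List Int) : Prop := out = special_sequence_alt n
instance (n : Int) (out : List Int) : Decidable (Spec_special_sequence n out) := by unfold Spec_special_sequence; infer_instance

-- ===== CLAIM (what is proved, stated in full; the proofs are below) =====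
def Claim_equal_special_sequence : Prop := ∀ (n : Int), Dom_special_sequence n → Spec_special_sequence n (special_sequence n)

-- ===== LEMMAS AND PROOFS =====

/-- The flat list [i, -i, i+1, -(i+1), …] of m pairs, what A's loop appends. -/
def seqPairs (i : Int) : Nat → List Int
  | 0 => []
  | m + 1 => i :: -i :: seqPairs (i + 1) m

theorem seqPairs_length (i : Int) (m : Nat) : (seqPairs i m).length = 2 * m := by
  induction m generalizing i with
  | zero => rfl
  | succ m ih => simp [seqPairs, ih]; omega

theorem specialSeqLoop_eq (n : Int) (m : Nat) (seq : List Int) (i : Int)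
    (h : (seq.length : Int) + 2 * m = 2 * n) :
    specialSeqLoop n m seq i = seq ++ seqPairs i m := by
  induction m generalizing seq i with
  | zero => simp [specialSeqLoop, seqPairs]
  | succ m ih =>
    have hlt : (seq.length : Int) < 2 * n := by push_cast at h ⊢; omega
    simp only [specialSeqLoop, if_pos hlt]
    rw [ih (seq ++ [i, -i]) (i + 1) (by simp; push_cast at h ⊢; omega)]
    simp [seqPairs]

theorem seqPairs_getElem (m : Nat) (i : Int) (j : Nat) (h : j < (seqPairs i m).length) :
    (seqPairs i m)[j] = if j % 2 = 0 then i + j / 2 else -(i + j / 2) := by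
  induction m generalizing i j with
  | zero => simp [seqPairs] at h
  | succ m ih =>
    match j with
    | 0 => simp [seqPairs]
    | 1 => simp [seqPairs]
    | j + 2 =>
      have h' : j < (seqPairs (i + 1) m).length := by
        simp [seqPairs] at h; omega
      show (seqPairs (i + 1) m)[j] = _
      rw [ih (i + 1) j h']
      have hm : (j + 2) % 2 = j % 2 := by omega
      have hd : ((j + 2 : Nat) : Int) / 2 = (j : Int) / 2 + 1 := by omega
      rcases Nat.even_or_odd j with he | ho
      · have : j % 2 = 0 := Nat.even_iff.mp he
        simp [hm, this]; omega
      · have : j % 2 = 1 := Nat.odd_iff.mp ho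
        simp [hm, this]; omega

theorem special_sequence_eq_alt (n : Int) : special_sequence n = special_sequence_alt n := by
  by_cases hn : n ≤ 0
  · -- n ≤ 0: A's loop never runs (len 0 < 2n fails, and fuel is 0), both give []
    have h0 : n.toNat = 0 := Int.toNat_of_nonpos hn
    unfold special_sequence special_sequence_alt
    rw [h0]
    have : PySem.List.pyRange 0 n 1 = [] := by
      simp [PySem.List.pyRange]; omega
    simp [this, specialSeqLoop, PySem.List.slice, PySem.List.clampIdx]
  · obtain ⟨m, rfl⟩ : ∃ m : Nat, n = (m : Int) :=
      ⟨n.toNat, (Int.toNat_of_nonneg (by omega : (0:Int) ≤ n)).symm⟩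
    unfold special_sequence special_sequence_alt
    rw [specialSeqLoop_eq (m : Int) (m : Int).toNat [] 1 (by simp)]
    rw [PySem.List.slice_to _ (by omega : (0:Int) ≤ (m : Int)), PySem.List.pyRange_zero_natCast]
    apply List.ext_getElem
    · simp [seqPairs_length]; omega
    · intro j h1 h2
      have hj : j < m := by simpa using h2
      have hjl : j < (seqPairs 1 (m : Int).toNat).length := by
        rw [seqPairs_length]; simp; omega
      simp only [List.getElem_take, List.nil_append, List.getElem_map, List.getElem_range]
      rw [seqPairs_getElem (m : Int).toNat 1 j hjl]
      have hmod : PySem.Int.mod (j : Int) 2 = ((j % 2 : Nat) : Int) := by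
        exact_mod_cast PySem.Int.mod_natCast j 2
      have hdiv : PySem.Int.floordiv (j : Int) 2 = ((j / 2 : Nat) : Int) := by
        exact_mod_cast PySem.Int.floordiv_natCast j 2
      rw [hmod, hdiv]
      rcases Nat.even_or_odd j with he | ho
      · have h2' : j % 2 = 0 := Nat.even_iff.mp he
        simp [h2']; omega
      · have h2' : j % 2 = 1 := Nat.odd_iff.mp ho
        simp [h2']; omega

-- ===== VERDICT (by name: the statement is the Claim_ definition above) =====
theorem special_sequence_spec : Claim_equal_special_sequence := by
  intro n _
  exact special_sequence_eq_alt n
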